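-- pv_equiv track=rewrite | github.com/omibd/WATEM | whatsapp/wa_actions.py | pending_jobs
-- ===== SOURCE A (Python) =====
-- def pending_jobs(d, action_dic, check_from_key = None):
--     '''check key and return pending jobs'''
--     key_found, dc = False, {}
--     for k, v in action_dic.items():
--         if check_from_key is not None and key_found==False:
--             if k == check_from_key:
--                 key_found = True
--                 dc = {k:v}
--         else:
--             dc[k] = v
--     else: return dc
-- ===== SOURCE B (Python) =====
-- def pending_jobs(d, action_dic, check_from_key=None):
--     '''check key and return pending jobs'''
--     if check_from_key is None:
--         return dict(action_dic)
--     keys = list(action_dic)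
--     if check_from_key not in keys:
--         return {}
--     i = keys.index(check_from_key)
--     return {k: action_dic[k] for k in keys[i:]}
-- ===== Notes on version B (the rewrite author's own statement) =====
-- stated objective: idiomatic
-- what changed: Replaces A's single-pass found-flag accumulation loop by locating the key's index in the key list, slicing the keys from that position, and rebuilding the dict by lookup over the slice.
import Mathlib
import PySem

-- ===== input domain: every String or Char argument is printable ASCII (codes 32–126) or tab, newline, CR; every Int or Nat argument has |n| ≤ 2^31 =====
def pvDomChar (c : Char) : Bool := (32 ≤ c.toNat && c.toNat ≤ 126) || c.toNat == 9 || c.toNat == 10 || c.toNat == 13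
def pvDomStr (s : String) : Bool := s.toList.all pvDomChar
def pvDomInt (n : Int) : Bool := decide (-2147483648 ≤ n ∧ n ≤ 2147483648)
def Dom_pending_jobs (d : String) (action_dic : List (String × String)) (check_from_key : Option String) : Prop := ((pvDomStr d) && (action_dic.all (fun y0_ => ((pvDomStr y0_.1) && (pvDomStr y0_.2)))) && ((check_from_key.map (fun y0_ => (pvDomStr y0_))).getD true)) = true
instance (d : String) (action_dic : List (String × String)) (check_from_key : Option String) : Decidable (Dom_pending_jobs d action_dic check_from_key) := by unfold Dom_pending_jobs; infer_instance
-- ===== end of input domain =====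

-- B replaces A's one-pass found-flag loop by locating the key's position and rebuilding the
-- dict from the key slice from that position on (objective: idiomatic; no speed claim).

-- ===== PORT A =====
-- loop body of A: state = (key_found, dc)
def pvStepA (check_from_key : Option String) (st : Bool × PySem.Dict String String)
    (kv : String × String) : Bool × PySem.Dict String String :=
  if check_from_key.isSome && !st.1 then
    (if some kv.1 = check_from_key then (true, PySem.Dict.ofList [(kv.1, kv.2)]) else st)
  else (st.1, st.2.insert kv.1 kv.2)

def pending_jobs (d : String) (action_dic : List (String × String)) (check_from_key : Option String) : List (String × String) :=
  ((action_dic.foldl (pvStepA check_from_key) (false, PySem.Dict.empty)).2).items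

-- ===== PORT B =====
def pending_jobs_alt (d : String) (action_dic : List (String × String)) (check_from_key : Option String) : List (String × String) :=
  match check_from_key with
  | none => (PySem.Dict.ofList action_dic).items          -- dict(action_dic)
  | some c =>
    let keys := action_dic.map Prod.fst                   -- keys = list(action_dic)
    if c ∈ keys then
      match PySem.List.index? keys c with                 -- i = keys.index(c)
      | some i =>
        ((PySem.List.slice keys (some (i : Int)) none).foldl   -- {k: action_dic[k] for k in keys[i:]}
          (fun dc k => dc.insert k ((PySem.Dict.ofList action_dic).getD k ""))
          PySem.Dict.empty).items
      | none => []                                        -- unreachable: c ∈ keys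
    else []

-- ===== PRECONDITION & SPEC =====
-- Pre_ excludes association lists with duplicate keys: they do not encode any Python dict
-- (dict construction collapses duplicates before A or B ever runs), so the lists quantified
-- over are exactly the item lists of real dicts.
def Pre_pending_jobs (d : String) (action_dic : List (String × String)) (check_from_key : Option String) : Prop :=
  (action_dic.map Prod.fst).Nodup
instance (d : String) (action_dic : List (String × String)) (check_from_key : Option String) : Decidable (Pre_pending_jobs d action_dic check_from_key) := by unfold Pre_pending_jobs; infer_instance

def pvWitness_pending_jobs : String × (List (String × String)) × Option String :=
  ("x", [("a", "1"), ("b", "2"), ("c", "3")], some "b")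

def Spec_pending_jobs (d : String) (action_dic : List (String × String)) (check_from_key : Option String) (out : List (String × String)) : Prop := out = pending_jobs_alt d action_dic check_from_key
instance (d : String) (action_dic : List (String × String)) (check_from_key : Option String) (out : List (String × String)) : Decidable (Spec_pending_jobs d action_dic check_from_key out) := by unfold Spec_pending_jobs; infer_instance

-- ===== CLAIM (what is proved, stated in full; the proofs are below) =====
def Claim_equal_pending_jobs : Prop := ∀ (d : String) (action_dic : List (String × String)) (check_from_key : Option String), Dom_pending_jobs d action_dic check_from_key → Pre_pending_jobs d action_dic check_from_key → Spec_pending_jobs d action_dic check_from_key (pending_jobs d action_dic check_from_key)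

-- ===== LEMMAS AND PROOFS =====

-- items of ofList on a duplicate-free pair list is the list itself
theorem pv_items_ofList (l : List (String × String)) (h : (l.map Prod.fst).Nodup) :
    (PySem.Dict.ofList l).items = l := by
  have := PySem.Dict.items_foldl_insert_fresh (l := l) (k := Prod.fst) (v := Prod.snd)
    (d := PySem.Dict.empty) (by intro a _; simp [pysem]) h
  simpa using this

-- after the key is found (or with check_from_key = none), A's loop is a plain insert loop
theorem pv_foldl_found (c? : Option String) (l : List (String × String))
    (dc : PySem.Dict String String) :
    l.foldl (pvStepA c?) (true, dc) =
      (true, l.foldl (fun dc kv => dc.insert kv.1 kv.2) dc) := by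
  induction l generalizing dc with
  | nil => rfl
  | cons kv t ih => simp [List.foldl, pvStepA, ih]

theorem pv_foldl_none (l : List (String × String)) (dc : PySem.Dict String String) :
    l.foldl (pvStepA none) (false, dc) =
      (false, l.foldl (fun dc kv => dc.insert kv.1 kv.2) dc) := by
  induction l generalizing dc with
  | nil => rfl
  | cons kv t ih => simp [List.foldl, pvStepA, ih]

-- before the key is found, A's loop leaves the state unchanged
theorem pv_foldl_skip (c : String) (l : List (String × String))
    (dc : PySem.Dict String String) (h : c ∉ l.map Prod.fst) :
    l.foldl (pvStepA (some c)) (false, dc) = (false, dc) := by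
  induction l with
  | nil => rfl
  | cons kv t ih =>
    simp only [List.map_cons, List.mem_cons, not_or] at h
    have h1 : kv.1 ≠ c := fun hh => h.1 hh.symm
    simp [List.foldl, pvStepA, h1, ih h.2]

-- split a list at the first pair whose key is c
theorem pv_split_first {l : List (String × String)} {c : String}
    (h : c ∈ l.map Prod.fst) :
    ∃ pre v rest, l = pre ++ (c, v) :: rest ∧ c ∉ pre.map Prod.fst := by
  induction l with
  | nil => simp at h
  | cons kv t ih =>
    by_cases hk : kv.1 = c
    · exact ⟨[], kv.2, t, by simp [← hk], by simp⟩
    · simp only [List.map_cons, List.mem_cons] at h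
      rcases h with h | h
      · exact absurd h.symm hk
      · obtain ⟨pre, v, rest, he, hp⟩ := ih h
        exact ⟨kv :: pre, v, rest, by simp [he], by simp [hp, Ne.symm hk]⟩

theorem pending_jobs_spec : Claim_equal_pending_jobs := by
  intro d l c? _ hnd
  unfold Pre_pending_jobs at hnd
  unfold Spec_pending_jobs pending_jobs pending_jobs_alt
  match c? with
  | none =>
    simp only [pv_foldl_none]
    rfl
  | some c =>
    dsimp only
    by_cases hc : c ∈ l.map Prod.fst
    · obtain ⟨pre, v, rest, he, hp⟩ := pv_split_first hc
      subst he
      -- facts about the key list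
      have hkeys : (pre ++ (c, v) :: rest).map Prod.fst
          = pre.map Prod.fst ++ c :: rest.map Prod.fst := by simp
      have hnd' := hnd
      rw [hkeys] at hnd'
      have hrestnd : (c :: rest.map Prod.fst).Nodup := (List.nodup_append.mp hnd').2.1
      have hcrest : c ∉ rest.map Prod.fst := by
        have := hrestnd; simp only [List.nodup_cons] at this; exact this.1
      -- B's index: first occurrence at pre.length
      have hidx : PySem.List.index? ((pre ++ (c, v) :: rest).map Prod.fst) c
          = some pre.length := by
        rw [hkeys, PySem.List.index?_eq_some_iff]
        exact ⟨pre.map Prod.fst, rest.map Prod.fst, rfl, by simp, hp⟩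
      -- A's side
      have hA : (pre ++ (c, v) :: rest).foldl (pvStepA (some c)) (false, PySem.Dict.empty)
          = (true, rest.foldl (fun dc kv => dc.insert kv.1 kv.2)
              (PySem.Dict.ofList [(c, v)])) := by
        rw [List.foldl_append, pv_foldl_skip c pre _ hp]
        simp [List.foldl, pvStepA, pv_foldl_found]
      have hAitems : (rest.foldl (fun dc kv => dc.insert kv.1 kv.2)
            (PySem.Dict.ofList [(c, v)])).items = (c, v) :: rest := by
        have := PySem.Dict.items_foldl_insert_fresh (l := rest) (k := Prod.fst)
          (v := Prod.snd) (d := PySem.Dict.ofList [(c, v)])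
          (by intro a ha
              have hne : a.1 ≠ c := fun hh => hcrest (hh ▸ List.mem_map_of_mem ha)
              have hof : (PySem.Dict.ofList [(c, v)] : PySem.Dict String String)
                  = PySem.Dict.mk [(c, v)] := rfl
              rw [hof]; simp [Ne.symm hne])
          (by have := (List.nodup_append.mp hnd').2.1; simp only [List.nodup_cons] at this
              exact this.2)
        simpa using this
      rw [hA]; dsimp only; rw [hAitems]
      -- B's side
      rw [hidx]
      simp only [hc, if_pos, PySem.List.slice_from_natCast]
      have hdrop : ((pre ++ (c, v) :: rest).map Prod.fst).drop pre.length
          = c :: rest.map Prod.fst := by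
        have hlen : (pre.map Prod.fst).length = pre.length := by simp
        rw [hkeys, ← hlen, List.drop_left]
      rw [hdrop]
      have hB : ((c :: rest.map Prod.fst).foldl
            (fun dc k => dc.insert k ((PySem.Dict.ofList (pre ++ (c, v) :: rest)).getD k ""))
            PySem.Dict.empty).items
          = (c :: rest.map Prod.fst).map
              (fun k => (k, (PySem.Dict.ofList (pre ++ (c, v) :: rest)).getD k "")) := by
        have := PySem.Dict.items_foldl_insert_fresh (l := c :: rest.map Prod.fst)
          (k := id) (v := fun k => (PySem.Dict.ofList (pre ++ (c, v) :: rest)).getD k "")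
          (d := PySem.Dict.empty) (by intro a _; simp [pysem]) (by simpa using hrestnd)
        simpa using this
      rw [hB]
      -- the looked-up values are the original ones
      have hitems : (PySem.Dict.ofList (pre ++ (c, v) :: rest)).items
          = pre ++ (c, v) :: rest := pv_items_ofList _ hnd
      have hkeysnd : (PySem.Dict.ofList (pre ++ (c, v) :: rest)).keys.Nodup :=
        PySem.Dict.nodup_keys_ofList _
      have hget : ∀ p : String × String, p ∈ pre ++ (c, v) :: rest →
          (PySem.Dict.ofList (pre ++ (c, v) :: rest)).getD p.1 "" = p.2 := by
        intro p hpmem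
        have hm : (p.1, p.2) ∈ (PySem.Dict.ofList (pre ++ (c, v) :: rest)).items := by
          rw [hitems]; simpa using hpmem
        exact PySem.Dict.getD_of_mem_items _ hm hkeysnd ""
      have h1 : (PySem.Dict.ofList (pre ++ (c, v) :: rest)).getD c "" = v := by
        simpa using hget (c, v) (by simp)
      simp only [List.map_cons, List.map_map, h1]
      congr 1
      symm
      refine (List.map_congr_left ?_).trans (List.map_id rest)
      intro p hpm
      have h2 := hget p (by simp [hpm])
      simp [Function.comp, h2]
    · have hA := pv_foldl_skip c l PySem.Dict.empty hc
      rw [hA]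
      simp [hc]
      rfl
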